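-- pv_equiv track=rewrite | github.com/erinalara/174---Sound-of-Music | soundofmusic.py | scale_to_ints
-- ===== SOURCE A (Python) =====
-- MAJOR_INTERVALS = [2, 2, 1, 2, 2, 2, 1]  # List of major intervals, 7 integers
--
-- MINOR_INTERVALS = [2, 1, 2, 2, 1, 2, 2]  # List of minor intervals, 7 integers
--
-- def scale_to_ints(scale):  # Converts scale to integers
--     notes_list = [scale[0]]  # Notes list is assigned as a list, with the scale note in first position
--
--     if scale[1] == 'major' or scale[1] == 'Major':  # Path for a major scale
--         for i in range(len(MAJOR_INTERVALS)):  # MAJOR_INTERVALS = [2, 2, 1, 2, 2, 2, 1]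
--             initial = notes_list[i]     # Initial value is set to the value of notes_list[i]
--             if initial < notes_list[i]:     # Makes sure that next note is calculated based off the integer before it
--                 initial = scale[0] + MAJOR_INTERVALS[i]     # Increments initial by major interval value
--             notes_list.append(initial + (MAJOR_INTERVALS[i]))   # Appends notes_list
--         return notes_list   # Returns list of notes as integers
--
--     elif scale[1] == 'minor' or scale[1] == 'Minor':  # Path for a minor scale
--         for i in range(len(MINOR_INTERVALS)):  # MINOR_INTERVALS = [2, 1, 2, 2, 1, 2, 2]
--             initial = notes_list[i]         # Initial value is set to the value of notes_list[i]
--             if initial < notes_list[i]:     # Makes sure that next note is calculated based off the integer before it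
--                 initial = scale[0] + MINOR_INTERVALS[i]     # Increments initial by minor interval value
--             notes_list.append(initial + (MINOR_INTERVALS[i]))       # Appends notes_list
--         return notes_list       # Returns list of notes as integers
-- ===== SOURCE B (Python) =====
-- MAJOR_OFFSETS = [0, 2, 4, 5, 7, 9, 11, 12]  # cumulative sums of the major intervals
-- MINOR_OFFSETS = [0, 2, 3, 5, 7, 8, 10, 12]  # cumulative sums of the minor intervals
--
-- def scale_to_ints(scale):
--     base = scale[0]
--     mode = scale[1]
--     if mode in ('major', 'Major'):
--         return [base + off for off in MAJOR_OFFSETS]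
--     if mode in ('minor', 'Minor'):
--         return [base + off for off in MINOR_OFFSETS]
-- ===== Notes on version B (the rewrite author's own statement) =====
-- stated objective: simpler
-- what changed: Replaces the running-accumulation loop (with its dead self-comparison guard) by a single map of the base note over precomputed cumulative-offset tables.
-- outside the precondition, e.g. on scale_to_ints((60, 'dorian')): A returns None, B returns None
import Mathlib
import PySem

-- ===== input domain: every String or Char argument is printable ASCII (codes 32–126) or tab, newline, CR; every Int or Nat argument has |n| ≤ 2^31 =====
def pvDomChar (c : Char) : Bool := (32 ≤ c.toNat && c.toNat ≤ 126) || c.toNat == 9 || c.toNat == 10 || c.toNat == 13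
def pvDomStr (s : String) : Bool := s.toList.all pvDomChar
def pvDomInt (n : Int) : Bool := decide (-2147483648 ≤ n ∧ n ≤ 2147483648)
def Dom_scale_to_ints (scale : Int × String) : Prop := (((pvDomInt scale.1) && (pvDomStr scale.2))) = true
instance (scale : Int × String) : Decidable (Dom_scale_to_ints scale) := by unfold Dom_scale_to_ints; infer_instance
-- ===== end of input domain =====

-- B replaces A's running-accumulation loop by mapping the base note over precomputed
-- cumulative-offset tables; equivalence proved on modes major/Major/minor/Minor (Pre_).

-- ===== PORT A =====
def MAJOR_INTERVALS : List Int := [2, 2, 1, 2, 2, 2, 1]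
def MINOR_INTERVALS : List Int := [2, 1, 2, 2, 1, 2, 2]

-- the loop body: indexing notes_list[i] is always in range on A's own runs, so pyGetD's
-- default 0 is never used; the dead 'if initial < notes_list[i]' branch is transliterated as is
def scale_to_ints_loop (scale : Int × String) (intervals : List Int) : List Int :=
  (PySem.List.pyRange 0 (intervals.length) 1).foldl
    (fun notes_list i =>
      let initial := PySem.List.pyGetD notes_list i 0
      let initial := if initial < PySem.List.pyGetD notes_list i 0 then
          scale.1 + PySem.List.pyGetD intervals i 0 else initial
      notes_list ++ [initial + PySem.List.pyGetD intervals i 0])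
    [scale.1]

def scale_to_ints (scale : Int × String) : List Int :=
  if scale.2 == "major" || scale.2 == "Major" then
    scale_to_ints_loop scale MAJOR_INTERVALS
  else if scale.2 == "minor" || scale.2 == "Minor" then
    scale_to_ints_loop scale MINOR_INTERVALS
  else []  -- Python falls through and returns None here; excluded by Pre_

-- ===== PORT B =====
def MAJOR_OFFSETS : List Int := [0, 2, 4, 5, 7, 9, 11, 12]
def MINOR_OFFSETS : List Int := [0, 2, 3, 5, 7, 8, 10, 12]

def scale_to_ints_alt (scale : Int × String) : List Int :=
  let base := scale.1
  let mode := scale.2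
  if mode == "major" || mode == "Major" then
    MAJOR_OFFSETS.map (fun off => base + off)
  else if mode == "minor" || mode == "Minor" then
    MINOR_OFFSETS.map (fun off => base + off)
  else []

-- ===== PRECONDITION & SPEC =====
-- Pre_ excludes modes other than major/Major/minor/Minor, on which A falls through and
-- returns None, which is not a value of the declared list type.
def Pre_scale_to_ints (scale : Int × String) : Prop :=
  scale.2 = "major" ∨ scale.2 = "Major" ∨ scale.2 = "minor" ∨ scale.2 = "Minor"
instance (scale : Int × String) : Decidable (Pre_scale_to_ints scale) := by
  unfold Pre_scale_to_ints; infer_instance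

def pvWitness_scale_to_ints : (Int × String) := (60, "major")

def Spec_scale_to_ints (scale : Int × String) (out : List Int) : Prop := out = scale_to_ints_alt scale
instance (scale : Int × String) (out : List Int) : Decidable (Spec_scale_to_ints scale out) := by unfold Spec_scale_to_ints; infer_instance

-- ===== CLAIM (what is proved, stated in full; the proofs are below) =====
def Claim_equal_scale_to_ints : Prop := ∀ (scale : Int × String), Dom_scale_to_ints scale → Pre_scale_to_ints scale → Spec_scale_to_ints scale (scale_to_ints scale)

-- ===== LEMMAS AND PROOFS =====
theorem loop_major (scale : Int × String) :
    scale_to_ints_loop scale MAJOR_INTERVALS = MAJOR_OFFSETS.map (fun off => scale.1 + off) := by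
  simp [scale_to_ints_loop, MAJOR_INTERVALS, MAJOR_OFFSETS, PySem.List.pyRange,
    PySem.List.pyGetD, PySem.List.pyGet?, PySem.List.pyIdx?, List.range_succ]
  omega

theorem loop_minor (scale : Int × String) :
    scale_to_ints_loop scale MINOR_INTERVALS = MINOR_OFFSETS.map (fun off => scale.1 + off) := by
  simp [scale_to_ints_loop, MINOR_INTERVALS, MINOR_OFFSETS, PySem.List.pyRange,
    PySem.List.pyGetD, PySem.List.pyGet?, PySem.List.pyIdx?, List.range_succ]
  omega

-- ===== VERDICT (by name: the statement is the Claim_ definition above) =====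
theorem scale_to_ints_spec : Claim_equal_scale_to_ints := by
  intro scale _dom _pre
  unfold Spec_scale_to_ints
  by_cases h1 : (scale.2 == "major" || scale.2 == "Major") = true
  · simp [scale_to_ints, scale_to_ints_alt, h1, loop_major]
  · by_cases h2 : (scale.2 == "minor" || scale.2 == "Minor") = true
    · simp [scale_to_ints, scale_to_ints_alt, h1, h2, loop_minor]
    · simp [scale_to_ints, scale_to_ints_alt, h1, h2]
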